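-- pv_equiv track=rewrite | github.com/eddddddy/AoC2020 | day04/day04.py | validate_pid
-- ===== SOURCE A (Python) =====
-- def validate_pid(s):
--     valid_chars = ['0', '1', '2', '3', '4', '5', '6', '7', '8', '9']
--     if len(s) != 9:
--         return False
--     for char in s:
--         if char not in valid_chars:
--             return False
--     return True
-- ===== SOURCE B (Python) =====
-- import re
--
-- def validate_pid(s):
--     return bool(re.fullmatch(r'[0-9]{9}', s))
-- ===== Notes on version B (the rewrite author's own statement) =====
-- stated objective: idiomatic
-- what changed: Replaced the explicit length guard and per-character membership loop over a 10-element list with a single anchored regex fullmatch against [0-9]{9}.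
import Mathlib
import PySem

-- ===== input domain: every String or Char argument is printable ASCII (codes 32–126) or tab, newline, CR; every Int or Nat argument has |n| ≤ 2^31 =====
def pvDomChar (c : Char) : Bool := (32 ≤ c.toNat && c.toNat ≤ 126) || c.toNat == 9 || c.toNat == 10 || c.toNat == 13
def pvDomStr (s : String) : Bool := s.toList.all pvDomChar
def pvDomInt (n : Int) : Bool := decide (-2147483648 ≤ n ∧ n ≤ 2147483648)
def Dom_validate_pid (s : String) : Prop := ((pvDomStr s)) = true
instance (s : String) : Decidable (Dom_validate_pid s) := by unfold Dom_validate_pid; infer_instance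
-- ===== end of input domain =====

-- B replaces A's length guard + per-character membership loop by one anchored regex fullmatch ([0-9]{9}); objective: idiomatic.

-- ===== PORT A =====
-- the valid_chars list literal of A
def pvValidChars : List Char := ['0', '1', '2', '3', '4', '5', '6', '7', '8', '9']

-- the for-loop with early return: checks each char's membership in valid_chars
def pvLoopA : List Char → Bool
  | [] => true
  | c :: rest => if !(pvValidChars.contains c) then false else pvLoopA rest

def validate_pid (s : String) : Bool :=
  if s.toList.length ≠ 9 then false else pvLoopA s.toList

-- ===== PORT B =====
-- re.fullmatch(r'[0-9]{9}', s): exactly nine characters, each in the class '0'..'9'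
def validate_pid_alt (s : String) : Bool :=
  decide (s.toList.length = 9) && s.toList.all (fun c => decide ('0' ≤ c) && decide (c ≤ '9'))

-- ===== PRECONDITION & SPEC =====
def Spec_validate_pid (s : String) (out : Bool) : Prop := out = validate_pid_alt s
instance (s : String) (out : Bool) : Decidable (Spec_validate_pid s out) := by unfold Spec_validate_pid; infer_instance

-- ===== CLAIM (what is proved, stated in full; the proofs are below) =====
def Claim_equal_validate_pid : Prop := ∀ (s : String), Dom_validate_pid s → Spec_validate_pid s (validate_pid s)

-- ===== LEMMAS AND PROOFS =====
theorem pvToNat_char_inj (a b : Char) (h : a.toNat = b.toNat) : a = b := by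
  apply Char.ext; exact UInt32.toNat_inj.mp h

theorem pvChar_eq_iff_toNat (c d : Char) : c = d ↔ c.toNat = d.toNat :=
  ⟨fun e => by rw [e], pvToNat_char_inj c d⟩

-- membership in A's list literal agrees with B's character-class test, character by character
theorem pvChar_mem_eq (c : Char) :
    pvValidChars.contains c = (decide ('0' ≤ c) && decide (c ≤ '9')) := by
  rw [Bool.eq_iff_iff]
  simp only [pvValidChars, List.contains_cons, List.contains_nil, Bool.or_false,
    Bool.or_eq_true, beq_iff_eq, Bool.and_eq_true, decide_eq_true_eq]
  constructor
  · rintro (rfl | rfl | rfl | rfl | rfl | rfl | rfl | rfl | rfl | rfl) <;>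
      exact ⟨by decide, by decide⟩
  · rintro ⟨h1, h2⟩
    have h1' : 48 ≤ c.toNat := UInt32.le_iff_toNat_le.mp (Char.le_def.mp h1)
    have h2' : c.toNat ≤ 57 := UInt32.le_iff_toNat_le.mp (Char.le_def.mp h2)
    simp only [pvChar_eq_iff_toNat, show ('0':Char).toNat = 48 from rfl,
      show ('1':Char).toNat = 49 from rfl, show ('2':Char).toNat = 50 from rfl,
      show ('3':Char).toNat = 51 from rfl, show ('4':Char).toNat = 52 from rfl,
      show ('5':Char).toNat = 53 from rfl, show ('6':Char).toNat = 54 from rfl,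
      show ('7':Char).toNat = 55 from rfl, show ('8':Char).toNat = 56 from rfl,
      show ('9':Char).toNat = 57 from rfl]
    omega

-- A's early-return loop equals B's all-check
theorem pvLoopA_eq_all (l : List Char) :
    pvLoopA l = l.all (fun c => decide ('0' ≤ c) && decide (c ≤ '9')) := by
  induction l with
  | nil => rfl
  | cons c rest ih =>
    rw [pvLoopA, List.all_cons, pvChar_mem_eq, ih]
    cases (decide ('0' ≤ c) && decide (c ≤ '9')) <;> simp

-- ===== VERDICT (by name: the statement is the Claim_ definition above) =====
theorem validate_pid_spec : Claim_equal_validate_pid := by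
  intro s _
  unfold Spec_validate_pid validate_pid validate_pid_alt
  rw [pvLoopA_eq_all]
  by_cases h : s.toList.length = 9 <;> simp [h]
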